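-- pv_equiv track=rewrite | github.com/krisshsaahi49/statistical_machine_translation_english_to_telugu | SMT_PhraseBased.py | train_phrase_table
-- ===== SOURCE A (Python) =====
-- def train_phrase_table(aligned_sentences):
--     """
--     Trains a phrase table using aligned sentences.
--     Args:
--         aligned_sentences (list): List of aligned sentences in the format [(english_sent, telugu_sent), ...]
--     Returns:
--         phrase_table (dict): Dictionary representing the phrase table
--     """
--     phrase_table = {}
--     for english_sent, telugu_sent in aligned_sentences:
--         english_phrases = english_sent.split()
--         telugu_phrases = telugu_sent.split()
--         for i in range(len(english_phrases)):
--             english_phrase = english_phrases[i]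
--             telugu_phrase = telugu_phrases[i]
--             if english_phrase not in phrase_table:
--                 phrase_table[english_phrase] = {}
--             if telugu_phrase not in phrase_table[english_phrase]:
--                 phrase_table[english_phrase][telugu_phrase] = 0
--             phrase_table[english_phrase][telugu_phrase] += 1
--     return phrase_table
-- ===== SOURCE B (Python) =====
-- def train_phrase_table(aligned_sentences):
--     """
--     Trains a phrase table using aligned sentences.
--     Group-by rewrite in three staged passes:
--     1. materialise the flat stream of (english, telugu) word pairs,
--     2. group the telugu words by english word (dict of lists),
--     3. count each group's telugu words into its nested dict.
--     """
--     pairs = []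
--     for english_sent, telugu_sent in aligned_sentences:
--         english_words = english_sent.split()
--         telugu_words = telugu_sent.split()
--         pairs += [(english_words[i], telugu_words[i])
--                   for i in range(len(english_words))]
--     groups = {}
--     for eng, tel in pairs:
--         groups.setdefault(eng, []).append(tel)
--     phrase_table = {}
--     for eng, tels in groups.items():
--         counts = {}
--         for tel in tels:
--             counts[tel] = counts.get(tel, 0) + 1
--         phrase_table[eng] = counts
--     return phrase_table
-- ===== Notes on version B (the rewrite author's own statement) =====
-- stated objective: alternative
-- what changed: B replaces A's on-the-fly nested-dict updates by three staged passes: it materialises the flat list of aligned word pairs, groups telugu words by english word into a dict of lists, and only then counts each group into the nested table.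
import Mathlib
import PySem

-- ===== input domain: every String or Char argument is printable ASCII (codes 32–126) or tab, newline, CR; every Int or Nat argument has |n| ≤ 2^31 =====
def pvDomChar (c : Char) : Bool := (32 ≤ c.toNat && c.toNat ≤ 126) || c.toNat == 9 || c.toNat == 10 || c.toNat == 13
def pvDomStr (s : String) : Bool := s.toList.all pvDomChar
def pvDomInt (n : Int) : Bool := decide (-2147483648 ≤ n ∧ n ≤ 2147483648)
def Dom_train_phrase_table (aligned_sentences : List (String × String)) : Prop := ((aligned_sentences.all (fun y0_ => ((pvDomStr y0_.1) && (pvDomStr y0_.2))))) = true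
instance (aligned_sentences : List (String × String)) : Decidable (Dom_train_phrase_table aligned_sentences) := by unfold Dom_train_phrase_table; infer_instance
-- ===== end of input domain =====

-- B is a staged group-by/count rewrite (alternative decomposition, not claimed faster).

-- ===== PORT A =====
-- one body-iteration of A's inner loop: the two membership tests and the in-place increment, literal
def pvStepA (pt : PySem.Dict String (PySem.Dict String Int)) (e t : String) :
    PySem.Dict String (PySem.Dict String Int) :=
  let pt1 := if pt.contains e then pt else pt.insert e PySem.Dict.empty
  let inner := pt1.getD e PySem.Dict.empty
  let inner1 := if inner.contains t then inner else inner.insert t 0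
  pt1.insert e (inner1.insert t (inner1.getD t 0 + 1))

def train_phrase_table (aligned_sentences : List (String × String)) :
    List (String × List (String × Int)) :=
  let pt := aligned_sentences.foldl (fun pt s =>
    let english_phrases := PySem.Str.split₀ s.1
    let telugu_phrases := PySem.Str.split₀ s.2
    (PySem.List.pyRange 0 (english_phrases.length : Int) 1).foldl (fun pt i =>
      pvStepA pt (PySem.List.pyGetD english_phrases i "")
                 (PySem.List.pyGetD telugu_phrases i "")) pt) PySem.Dict.empty
  pt.items.map (fun p => (p.1, p.2.items))

-- ===== PORT B =====
def train_phrase_table_alt (aligned_sentences : List (String × String)) :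
    List (String × List (String × Int)) :=
  -- pass 1: the flat stream of aligned word pairs (the `pairs +=` comprehension)
  let pairs := aligned_sentences.flatMap (fun s =>
    let english_words := PySem.Str.split₀ s.1
    let telugu_words := PySem.Str.split₀ s.2
    (PySem.List.pyRange 0 (english_words.length : Int) 1).map (fun i =>
      (PySem.List.pyGetD english_words i "", PySem.List.pyGetD telugu_words i "")))
  -- pass 2: groups.setdefault(eng, []).append(tel) mutates the held list in place = Dict.modify
  let groups := pairs.foldl (fun g p => g.modify p.1 [] (· ++ [p.2])) PySem.Dict.empty
  -- pass 3: count each group's telugu words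
  groups.items.map (fun g =>
    (g.1, (g.2.foldl (fun c t => c.insert t (c.getD t 0 + 1)) PySem.Dict.empty).items))

-- ===== PRECONDITION & SPEC =====
-- Pre_ excludes exactly the inputs on which A raises IndexError: a sentence pair whose
-- English side splits into more words than its Telugu side (B raises there too).
def Pre_train_phrase_table (aligned_sentences : List (String × String)) : Prop :=
  ∀ p ∈ aligned_sentences,
    (PySem.Str.split₀ p.1).length ≤ (PySem.Str.split₀ p.2).length
instance (aligned_sentences : List (String × String)) : Decidable (Pre_train_phrase_table aligned_sentences) := by unfold Pre_train_phrase_table; infer_instance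
def pvWitness_train_phrase_table : (List (String × String)) :=
  [("the cat", "a b c"), ("", "x"), ("the dog", "a d")]

def Spec_train_phrase_table (aligned_sentences : List (String × String)) (out : List (String × List (String × Int))) : Prop := out = train_phrase_table_alt aligned_sentences
instance (aligned_sentences : List (String × String)) (out : List (String × List (String × Int))) : Decidable (Spec_train_phrase_table aligned_sentences out) := by unfold Spec_train_phrase_table; infer_instance

-- ===== CLAIM (what is proved, stated in full; the proofs are below) =====
def Claim_equal_train_phrase_table : Prop := ∀ (aligned_sentences : List (String × String)), Dom_train_phrase_table aligned_sentences → Pre_train_phrase_table aligned_sentences → Spec_train_phrase_table aligned_sentences (train_phrase_table aligned_sentences)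

-- ===== LEMMAS AND PROOFS =====

-- insert/getD normal form of A's step
theorem pvStepA_eq (pt : PySem.Dict String (PySem.Dict String Int)) (e t : String) :
    pvStepA pt e t =
      pt.insert e ((pt.getD e PySem.Dict.empty).insert t
        ((pt.getD e PySem.Dict.empty).getD t 0 + 1)) := by
  unfold pvStepA
  by_cases he : pt.contains e = true
  · simp only [he, if_true]
    by_cases ht : (pt.getD e PySem.Dict.empty).contains t = true
    · simp [ht]
    · simp only [Bool.not_eq_true] at ht
      simp [ht, PySem.Dict.getD_of_not_contains _ _ ht,
        PySem.Dict.getD_insert_self, PySem.Dict.insert_insert_self]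
  · simp only [Bool.not_eq_true] at he
    simp [he, PySem.Dict.getD_insert_self, PySem.Dict.getD_of_not_contains _ _ he,
      PySem.Dict.contains_empty, PySem.Dict.insert_insert_self]

-- A's fold in normal form, as the insert-keyed fold over the flat pair stream
def pvStepA' (pt : PySem.Dict String (PySem.Dict String Int)) (p : String × String) :
    PySem.Dict String (PySem.Dict String Int) :=
  pt.insert p.1 ((pt.getD p.1 PySem.Dict.empty).insert p.2
    ((pt.getD p.1 PySem.Dict.empty).getD p.2 0 + 1))

-- the inner-dict lookup through A's fold is the counting fold over the matching telugu words
theorem pvGetD_foldl_stepA' (L : List (String × String)) (e : String)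
    (d : PySem.Dict String (PySem.Dict String Int)) :
    (L.foldl pvStepA' d).getD e PySem.Dict.empty
      = ((L.filter (fun p => p.1 == e)).map (·.2)).foldl
          (fun c t => c.insert t (c.getD t 0 + 1)) (d.getD e PySem.Dict.empty) := by
  induction L generalizing d with
  | nil => rfl
  | cons p L ih =>
    rw [List.foldl_cons, ih]
    by_cases hpe : p.1 = e
    · rw [List.filter_cons_of_pos (by simp [hpe])]
      simp [pvStepA', hpe, PySem.Dict.getD_insert_self]
    · rw [List.filter_cons_of_neg (by simp [hpe])]
      have : (pvStepA' d p).getD e PySem.Dict.empty = d.getD e PySem.Dict.empty := by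
        unfold pvStepA'
        exact PySem.Dict.getD_insert_of_ne _ _ _ (fun h => hpe h.symm)
      rw [this]

-- the per-sentence pair stream both ports traverse
def pvPairs (s : String × String) : List (String × String) :=
  (PySem.List.pyRange 0 ((PySem.Str.split₀ s.1).length : Int) 1).map
    (fun i => (PySem.List.pyGetD (PySem.Str.split₀ s.1) i "",
               PySem.List.pyGetD (PySem.Str.split₀ s.2) i ""))

-- ===== VERDICT (by name: the statement is the Claim_ definition above) =====
theorem train_phrase_table_spec : Claim_equal_train_phrase_table := by
  intro al _ _
  show train_phrase_table al = train_phrase_table_alt al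
  -- both sides over the flat stream L of pairs
  set L := al.flatMap pvPairs with hL
  have hA : train_phrase_table al
      = (L.foldl pvStepA' PySem.Dict.empty).items.map (fun p => (p.1, p.2.items)) := by
    unfold train_phrase_table
    simp only [hL, List.foldl_flatMap, List.foldl_map, pvPairs]
    congr 2
    apply PySem.List.foldl_congr_mem
    intro acc s _
    apply PySem.List.foldl_congr_mem
    intro acc' i _
    exact pvStepA_eq acc' _ _
  have hB : train_phrase_table_alt al
      = (L.foldl (fun g p => g.modify p.1 [] (· ++ [p.2])) PySem.Dict.empty).items.map
          (fun g => (g.1, (g.2.foldl (fun c t => c.insert t (c.getD t 0 + 1))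
            PySem.Dict.empty).items)) := by
    rw [hL]; rfl
  rw [hA, hB]
  set G := L.foldl (fun g p => g.modify p.1 [] (· ++ [p.2]))
    (PySem.Dict.empty : PySem.Dict String (List String)) with hG
  set PT := L.foldl pvStepA' (PySem.Dict.empty : PySem.Dict String (PySem.Dict String Int))
    with hPT
  -- both dicts have the same keys (first occurrences of english words), nodup
  have hsA : pvStepA' = fun pt (p : String × String) =>
      pt.insert p.1 ((pt.getD p.1 PySem.Dict.empty).insert p.2
        ((pt.getD p.1 PySem.Dict.empty).getD p.2 0 + 1)) := rfl
  have hndA : PT.keys.Nodup := by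
    rw [hPT, hsA]
    exact PySem.Dict.nodup_keys_foldl_insert_key L (·.1) _ _ PySem.Dict.nodup_keys_empty
  have hndB : G.keys.Nodup := by
    rw [hG]
    exact PySem.Dict.nodup_keys_foldl_modify_key L (·.1) _ _ _ PySem.Dict.nodup_keys_empty
  have hkeys : PT.keys = G.keys := by
    rw [hPT, hG, hsA]
    rw [PySem.Dict.keys_foldl_insert_key, PySem.Dict.keys_foldl_modify_key]
    simp [PySem.Dict.keys_empty]
  -- expand both items lists over the common key list and compare pointwise
  rw [PySem.Dict.items_eq_map_keys PT hndA PySem.Dict.empty,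
    PySem.Dict.items_eq_map_keys G hndB ([] : List String), hkeys,
    List.map_map, List.map_map]
  apply List.map_congr_left
  intro e _
  simp only [Function.comp]
  congr 1
  have hgd : G.getD e [] = (L.filter (fun p => p.1 == e)).map (·.2) := by
    rw [hG, PySem.Dict.getD_foldl_modify_append, PySem.Dict.getD_empty]
    simp
  rw [hgd, hPT, pvGetD_foldl_stepA', PySem.Dict.getD_empty]
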